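-- pv_equiv track=rewrite | github.com/RCBSi/advent-of-code-2020 | day20_jigsaw_flipper.py | orient_first_corner
-- ===== SOURCE A (Python) =====
-- def find_orientation(sa, sb):
--     if sa == sb:
--         return 1
--     if sa == sb[::-1]:
--         return -1
--     return 0
--
-- def orient_first_corner(a,b,c,d):
--     take_to_east = [find_orientation(x, b) for x in a]
--     take_to_south = [find_orientation(x, c) for x in a]
--     if (take_to_east == [0,1,0,0] or take_to_east == [0,-1,0,0]):
--         if (take_to_south == [1,0,0,0] or take_to_south == [-1,0,0,0]):
--             return "flip vertical"
--     if [take_to_east, take_to_south] == [[1, 0, 0, 0], [0, 0, 0, -1]]: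
--             return "flip antidiagonal"
--     return "dunno"
-- ===== SOURCE B (Python) =====
-- def find_orientation(sa, sb):
--     if sa == sb:
--         return 1
--     if sa == sb[::-1]:
--         return -1
--     return 0
--
-- def orient_first_corner(a, b, c, d):
--     # one pass: sparse lists of (index, sign) of edges matching b resp. c
--     em = []
--     sm = []
--     i = 0
--     for x in a:
--         e = find_orientation(x, b)
--         if e:
--             em.append((i, e))
--         s = find_orientation(x, c)
--         if s:
--             sm.append((i, s))
--         i += 1
--     if len(a) == 4 and len(em) == 1 and len(sm) == 1:
--         (ei, eo), (si, so) = em[0], sm[0]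
--         if ei == 1 and si == 0:
--             return "flip vertical"
--         if (ei, eo) == (0, 1) and (si, so) == (3, -1):
--             return "flip antidiagonal"
--     return "dunno"
-- ===== Notes on version B (the rewrite author's own statement) =====
-- stated objective: alternative
-- what changed: Instead of building the two dense 0/1/-1 signature lists and comparing them against literal patterns, B collects a sparse list of (index, sign) edge matches per border and decides the orientation from the position and sign of the unique match (requiring exactly one match east and one south).
import Mathlib
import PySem

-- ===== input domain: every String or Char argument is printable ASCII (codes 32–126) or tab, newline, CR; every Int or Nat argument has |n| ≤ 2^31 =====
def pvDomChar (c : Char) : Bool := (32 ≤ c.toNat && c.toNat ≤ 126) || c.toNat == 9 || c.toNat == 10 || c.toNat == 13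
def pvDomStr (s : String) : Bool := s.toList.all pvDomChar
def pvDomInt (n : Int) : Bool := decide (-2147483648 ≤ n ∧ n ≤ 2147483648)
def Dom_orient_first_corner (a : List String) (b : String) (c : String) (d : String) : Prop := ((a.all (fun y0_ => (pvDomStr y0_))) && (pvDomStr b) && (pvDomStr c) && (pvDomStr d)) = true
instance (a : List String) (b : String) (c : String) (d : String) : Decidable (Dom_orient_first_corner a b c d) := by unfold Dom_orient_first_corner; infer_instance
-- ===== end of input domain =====

-- B replaces A's dense signature lists (compared against literal patterns) by a one-pass
-- sparse list of (index, sign) matches and tests the unique match's position (alternative, same cost).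

-- shared module helper (identical in Source A and Source B)
def find_orientation (sa sb : String) : Int :=
  if sa = sb then 1
  else if some sa = PySem.Str.slice? sb none none (-1) then -1  -- sa == sb[::-1]
  else 0

-- ===== PORT A =====
def orient_first_corner (a : List String) (b : String) (c : String) (d : String) : String :=
  let take_to_east := a.map (fun x => find_orientation x b)
  let take_to_south := a.map (fun x => find_orientation x c)
  if (take_to_east = [0, 1, 0, 0] ∨ take_to_east = [0, -1, 0, 0]) ∧
     (take_to_south = [1, 0, 0, 0] ∨ take_to_south = [-1, 0, 0, 0]) then "flip vertical"
  else if take_to_east = [1, 0, 0, 0] ∧ take_to_south = [0, 0, 0, -1] then "flip antidiagonal"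
  else "dunno"

-- ===== PORT B =====
-- one step of Source B's loop body: state is (em, sm, i)
def ofc_step (b c : String) (st : List (Int × Int) × List (Int × Int) × Int) (x : String) :
    List (Int × Int) × List (Int × Int) × Int :=
  let e := find_orientation x b
  let em := if e ≠ 0 then st.1 ++ [(st.2.2, e)] else st.1
  let s := find_orientation x c
  let sm := if s ≠ 0 then st.2.1 ++ [(st.2.2, s)] else st.2.1
  (em, sm, st.2.2 + 1)

def orient_first_corner_alt (a : List String) (b : String) (c : String) (d : String) : String :=
  let r := a.foldl (ofc_step b c) ([], [], 0)
  let em := r.1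
  let sm := r.2.1
  if a.length = 4 ∧ em.length = 1 ∧ sm.length = 1 then
    match em, sm with
    | (ei, eo) :: _, (si, so) :: _ =>
      if ei = 1 ∧ si = 0 then "flip vertical"
      else if (ei = 0 ∧ eo = 1) ∧ (si = 3 ∧ so = -1) then "flip antidiagonal"
      else "dunno"
    | _, _ => "dunno"
  else "dunno"

-- ===== PRECONDITION & SPEC =====
def Spec_orient_first_corner (a : List String) (b : String) (c : String) (d : String) (out : String) : Prop := out = orient_first_corner_alt a b c d
instance (a : List String) (b : String) (c : String) (d : String) (out : String) : Decidable (Spec_orient_first_corner a b c d out) := by unfold Spec_orient_first_corner; infer_instance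

-- ===== CLAIM (what is proved, stated in full; the proofs are below) =====
def Claim_equal_orient_first_corner : Prop := ∀ (a : List String) (b : String) (c : String) (d : String), Dom_orient_first_corner a b c d → Spec_orient_first_corner a b c d (orient_first_corner a b c d)

-- ===== LEMMAS AND PROOFS =====

-- A's branch chain on a 4-element list, as a function of the eight orientation values
def ofcA (e0 e1 e2 e3 s0 s1 s2 s3 : Int) : String :=
  if ([e0,e1,e2,e3] = ([0, 1, 0, 0] : List Int) ∨ [e0,e1,e2,e3] = ([0, -1, 0, 0] : List Int)) ∧
     ([s0,s1,s2,s3] = ([1, 0, 0, 0] : List Int) ∨ [s0,s1,s2,s3] = ([-1, 0, 0, 0] : List Int)) then "flip vertical"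
  else if [e0,e1,e2,e3] = ([1, 0, 0, 0] : List Int) ∧ [s0,s1,s2,s3] = ([0, 0, 0, -1] : List Int) then "flip antidiagonal"
  else "dunno"

-- B's sparse-match test on a 4-element list, as a function of the eight orientation values
def ofcB (e0 e1 e2 e3 s0 s1 s2 s3 : Int) : String :=
  let em := (if e0 ≠ 0 then [((0:Int), e0)] else []) ++ (if e1 ≠ 0 then [((1:Int), e1)] else [])
            ++ (if e2 ≠ 0 then [((2:Int), e2)] else []) ++ (if e3 ≠ 0 then [((3:Int), e3)] else [])
  let sm := (if s0 ≠ 0 then [((0:Int), s0)] else []) ++ (if s1 ≠ 0 then [((1:Int), s1)] else [])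
            ++ (if s2 ≠ 0 then [((2:Int), s2)] else []) ++ (if s3 ≠ 0 then [((3:Int), s3)] else [])
  if (4:Nat) = 4 ∧ em.length = 1 ∧ sm.length = 1 then
    match em, sm with
    | (ei, eo) :: _, (si, so) :: _ =>
      if ei = 1 ∧ si = 0 then "flip vertical"
      else if (ei = 0 ∧ eo = 1) ∧ (si = 3 ∧ so = -1) then "flip antidiagonal"
      else "dunno"
    | _, _ => "dunno"
  else "dunno"

-- find_orientation only takes the values 1, -1, 0
theorem fo_range (sa sb : String) : find_orientation sa sb ∈ ([1, -1, 0] : List Int) := by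
  unfold find_orientation; split_ifs <;> simp

-- the whole equivalence, checked over all 3^8 orientation-value combinations
theorem ofc_core : ∀ e0 ∈ ([1,-1,0] : List Int), ∀ e1 ∈ ([1,-1,0] : List Int),
    ∀ e2 ∈ ([1,-1,0] : List Int), ∀ e3 ∈ ([1,-1,0] : List Int),
    ∀ s0 ∈ ([1,-1,0] : List Int), ∀ s1 ∈ ([1,-1,0] : List Int),
    ∀ s2 ∈ ([1,-1,0] : List Int), ∀ s3 ∈ ([1,-1,0] : List Int),
    ofcA e0 e1 e2 e3 s0 s1 s2 s3 = ofcB e0 e1 e2 e3 s0 s1 s2 s3 := by decide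

-- proof helper: the sparse match list the loop accumulates, defined recursively
def ofc_mlist (xs : List String) (t : String) (i : Int) : List (Int × Int) :=
  match xs with
  | [] => []
  | x :: rest =>
    let o := find_orientation x t
    let r := ofc_mlist rest t (i + 1)
    if o ≠ 0 then (i, o) :: r else r

-- loop invariant: the fold appends the two sparse match lists and advances the counter
theorem ofc_fold_eq (b c : String) (xs : List String) (em sm : List (Int × Int)) (i : Int) :
    List.foldl (ofc_step b c) (em, sm, i) xs =
      (em ++ ofc_mlist xs b i, sm ++ ofc_mlist xs c i, i + xs.length) := by
  induction xs generalizing em sm i with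
  | nil => simp [ofc_mlist]
  | cons x rest ih =>
    simp only [List.foldl, ofc_step, ofc_mlist, ih]
    split_ifs <;> simp <;> omega

-- ofc_mlist on a 4-element list, as an append of singleton/empty pieces
theorem ofc_mlist_four (x0 x1 x2 x3 : String) (t : String) :
    ofc_mlist [x0, x1, x2, x3] t 0 =
      (if find_orientation x0 t ≠ 0 then [((0:Int), find_orientation x0 t)] else [])
      ++ (if find_orientation x1 t ≠ 0 then [((1:Int), find_orientation x1 t)] else [])
      ++ (if find_orientation x2 t ≠ 0 then [((2:Int), find_orientation x2 t)] else [])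
      ++ (if find_orientation x3 t ≠ 0 then [((3:Int), find_orientation x3 t)] else []) := by
  simp only [ofc_mlist]
  norm_num
  split_ifs <;> simp

-- the loop on a 4-element list produces the two appended sparse lists and counter 4
theorem ofc_fold_four (x0 x1 x2 x3 b c : String) :
    List.foldl (ofc_step b c) ([], [], 0) [x0, x1, x2, x3] =
      ((if find_orientation x0 b ≠ 0 then [((0:Int), find_orientation x0 b)] else [])
        ++ (if find_orientation x1 b ≠ 0 then [((1:Int), find_orientation x1 b)] else [])
        ++ (if find_orientation x2 b ≠ 0 then [((2:Int), find_orientation x2 b)] else [])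
        ++ (if find_orientation x3 b ≠ 0 then [((3:Int), find_orientation x3 b)] else []),
       (if find_orientation x0 c ≠ 0 then [((0:Int), find_orientation x0 c)] else [])
        ++ (if find_orientation x1 c ≠ 0 then [((1:Int), find_orientation x1 c)] else [])
        ++ (if find_orientation x2 c ≠ 0 then [((2:Int), find_orientation x2 c)] else [])
        ++ (if find_orientation x3 c ≠ 0 then [((3:Int), find_orientation x3 c)] else []),
       (4 : Int)) := by
  rw [ofc_fold_eq, ofc_mlist_four, ofc_mlist_four]
  simp

-- ===== VERDICT (by name: the statement is the Claim_ definition above) =====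
theorem orient_first_corner_spec : Claim_equal_orient_first_corner := by
  intro a b c d _
  unfold Spec_orient_first_corner orient_first_corner orient_first_corner_alt
  match a with
  | [x0, x1, x2, x3] =>
    rw [ofc_fold_four]
    exact ofc_core _ (fo_range x0 b) _ (fo_range x1 b) _ (fo_range x2 b) _ (fo_range x3 b)
      _ (fo_range x0 c) _ (fo_range x1 c) _ (fo_range x2 c) _ (fo_range x3 c)
  | [] => simp
  | [x0] => simp
  | [x0, x1] => simp
  | [x0, x1, x2] => simp
  | x0 :: x1 :: x2 :: x3 :: x4 :: rest => simp [List.length]
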